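-- pv_equiv track=rewrite | github.com/carolsrto/illegality-risk-ns | src/data-collection-and-preprocessing/download-autef-pa/script.py | parseHtml
-- ===== SOURCE A (Python) =====
-- def parseHtml(html, tag):
--     idx = -1
--     idx1 = -1
--     idx2 = -1
--     lines = html.splitlines()
--
--     for line in lines:
--         idx = idx + 1
--         if idx1 == -1:
--             if line.find("<" + tag) == -1:
--                 continue
--             else:
--                 idx1 = idx
--         else:
--             if line.find("</" + tag) == -1:
--                 continue
--             else:
--                 idx2 = idx + 1
--                 break
--
--     if idx1 != -1 and idx2 != -1:
--         text = "\n".join(lines[idx1:idx2])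
--         return text
--
--     return ""
-- ===== SOURCE B (Python) =====
-- def parseHtml(html, tag):
--     it = iter(html.splitlines())
--     open_mark = "<" + tag
--     for line in it:
--         if open_mark in line:
--             block = [line]
--             close_mark = "</" + tag
--             for line in it:
--                 block.append(line)
--                 if close_mark in line:
--                     return "\n".join(block)
--             return ""
--     return ""
-- ===== Notes on version B (the rewrite author's own statement) =====
-- stated objective: simpler
-- what changed: Replaced the single counter-driven state machine (idx/idx1/idx2 plus a final slice-and-join of the original list) by two phase loops consuming one shared iterator that accumulate the output block's lines directly and return it as soon as the closing line is appended - no indices, no slicing, no post-loop conditional.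
import Mathlib
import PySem

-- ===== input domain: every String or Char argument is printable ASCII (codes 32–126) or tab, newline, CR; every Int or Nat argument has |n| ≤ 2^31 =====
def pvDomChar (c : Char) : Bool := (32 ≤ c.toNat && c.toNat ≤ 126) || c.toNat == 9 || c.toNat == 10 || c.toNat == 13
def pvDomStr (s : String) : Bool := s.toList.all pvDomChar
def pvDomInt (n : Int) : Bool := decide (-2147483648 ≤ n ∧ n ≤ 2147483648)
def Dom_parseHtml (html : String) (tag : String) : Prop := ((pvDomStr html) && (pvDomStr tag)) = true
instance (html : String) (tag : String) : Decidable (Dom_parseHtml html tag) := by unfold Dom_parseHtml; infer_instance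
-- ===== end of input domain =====

-- B replaces A's counter-driven index state machine (and its final slice-and-join) by two phase loops over one
-- shared line stream that accumulate the output block directly (simpler decomposition, same cost).


-- ===== PORT A =====
-- A's single loop: idx counts lines, idx1/idx2 are -1 until the opening/closing line is seen; break on the close.
def parseHtmlLoop (tag : String) : List String → Int → Int → Int → Int × Int
  | [], _idx, idx1, idx2 => (idx1, idx2)
  | line :: rest, idx, idx1, idx2 =>
    let idx' := idx + 1
    if idx1 = -1 then
      if PySem.Str.find line ("<" ++ tag) = -1 then parseHtmlLoop tag rest idx' idx1 idx2
      else parseHtmlLoop tag rest idx' idx' idx2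
    else
      if PySem.Str.find line ("</" ++ tag) = -1 then parseHtmlLoop tag rest idx' idx1 idx2
      else (idx1, idx' + 1)

def parseHtml (html : String) (tag : String) : String :=
  let lines := PySem.Str.splitlines html
  let r := parseHtmlLoop tag lines (-1) (-1) (-1)
  if r.1 ≠ -1 ∧ r.2 ≠ -1 then PySem.Str.join "\n" (PySem.List.slice lines (some r.1) (some r.2))
  else ""

-- ===== PORT B =====
-- B's second phase: keep consuming the shared stream, appending each line to the block;
-- return the joined block as soon as a line containing the closing mark was appended.
def altScanClose (closeMark : String) : List String → List String → String
  | [], _block => ""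
  | line :: rest, block =>
    let block' := block ++ [line]
    if PySem.Str.isIn closeMark line then PySem.Str.join "\n" block'
    else altScanClose closeMark rest block'

-- B's first phase: consume the stream until a line containing the opening mark; it starts the block.
def altScanOpen (openMark closeMark : String) : List String → String
  | [] => ""
  | line :: rest =>
    if PySem.Str.isIn openMark line then altScanClose closeMark rest [line]
    else altScanOpen openMark closeMark rest

def parseHtml_alt (html : String) (tag : String) : String :=
  altScanOpen ("<" ++ tag) ("</" ++ tag) (PySem.Str.splitlines html)

-- ===== PRECONDITION & SPEC =====
def Spec_parseHtml (html : String) (tag : String) (out : String) : Prop := out = parseHtml_alt html tag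
instance (html : String) (tag : String) (out : String) : Decidable (Spec_parseHtml html tag out) := by unfold Spec_parseHtml; infer_instance

-- ===== CLAIM (what is proved, stated in full; the proofs are below) =====
def Claim_equal_parseHtml : Prop := ∀ (html : String) (tag : String), Dom_parseHtml html tag → Spec_parseHtml html tag (parseHtml html tag)

-- ===== LEMMAS AND PROOFS =====

-- Python's `line.find(m) == -1` is the negation of B's `m in line`.
theorem find_neg_one_iff_not_isIn (l m : String) :
    (PySem.Str.find l m = -1) ↔ ¬ (PySem.Str.isIn m l = true) := by
  rw [PySem.Str.find_eq_neg_one_iff, PySem.Str.isIn_iff_infix]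

-- A, phase 2: once idx1 is set (≠ -1) and idx2 is still -1, the loop is a first-match
-- search for the closing tag, returning idx1 and (position + 1) or -1.
theorem loop_phase2 (tag : String) (ls : List String) (c i1 : Int) (h : i1 ≠ -1) :
    parseHtmlLoop tag ls c i1 (-1) =
      match ls.findIdx? (fun l => PySem.Str.isIn ("</" ++ tag) l) with
      | none => (i1, -1)
      | some j => (i1, c + (j : Int) + 2) := by
  induction ls generalizing c with
  | nil => rfl
  | cons l rest ih =>
    by_cases hp : PySem.Str.isIn ("</" ++ tag) l = true
    · have hf : ¬ (PySem.Str.find l ("</" ++ tag) = -1) := by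
        rw [find_neg_one_iff_not_isIn]; exact not_not_intro hp
      simp only [parseHtmlLoop, if_neg h, if_neg hf, List.findIdx?_cons, hp, if_true]
      simp only [Prod.mk.injEq, true_and]; ring
    · have hf : PySem.Str.find l ("</" ++ tag) = -1 := by
        rw [find_neg_one_iff_not_isIn]; exact hp
      simp only [parseHtmlLoop, if_neg h, if_pos hf, List.findIdx?_cons, hp,
        Bool.false_eq_true, if_false]
      rw [ih (c + 1)]
      cases hrest : rest.findIdx? (fun l => PySem.Str.isIn ("</" ++ tag) l) with
      | none => rfl
      | some j =>
        simp only [Option.map_some, Prod.mk.injEq, true_and]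
        push_cast; ring

-- A, phase 1: starting at absolute index k with idx1 = idx2 = -1, the loop first
-- searches for the opening tag, then hands over to phase 2 on the remaining lines.
theorem loop_phase1 (tag : String) (ls : List String) (k : Nat) :
    parseHtmlLoop tag ls ((k : Int) - 1) (-1) (-1) =
      match ls.findIdx? (fun l => PySem.Str.isIn ("<" ++ tag) l) with
      | none => (-1, -1)
      | some i =>
        match (ls.drop (i + 1)).findIdx? (fun l => PySem.Str.isIn ("</" ++ tag) l) with
        | none => (((k + i : Nat) : Int), -1)
        | some j => (((k + i : Nat) : Int), ((k + i : Nat) : Int) + (j : Int) + 2) := by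
  induction ls generalizing k with
  | nil => rfl
  | cons l rest ih =>
    by_cases hp : PySem.Str.isIn ("<" ++ tag) l = true
    · have hf : ¬ (PySem.Str.find l ("<" ++ tag) = -1) := by
        rw [find_neg_one_iff_not_isIn]; exact not_not_intro hp
      have hk1 : ((k : Int) - 1) + 1 = (k : Int) := by ring
      have hkne : (k : Int) ≠ -1 := by omega
      simp only [parseHtmlLoop, if_neg hf, hk1, List.findIdx?_cons, hp, if_true]
      rw [loop_phase2 tag rest (k : Int) (k : Int) hkne]
      simp only [List.drop_succ_cons, List.drop_zero]
      cases hrest : rest.findIdx? (fun l => PySem.Str.isIn ("</" ++ tag) l) with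
      | none => simp
      | some j => simp only [Nat.add_zero]
    · have hf : PySem.Str.find l ("<" ++ tag) = -1 := by
        rw [find_neg_one_iff_not_isIn]; exact hp
      have hk1 : ((k : Int) - 1) + 1 = ((k + 1 : Nat) : Int) - 1 := by push_cast; ring
      simp only [parseHtmlLoop, if_pos hf, hk1, List.findIdx?_cons, hp,
        Bool.false_eq_true, if_false, ite_true]
      rw [ih (k + 1)]
      cases hrest : rest.findIdx? (fun l => PySem.Str.isIn ("<" ++ tag) l) with
      | none => rfl
      | some i =>
        simp only [Option.map_some, List.drop_succ_cons]
        have hk2 : (k + 1 + i : Nat) = (k + (i + 1) : Nat) := by omega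
        rw [hk2]

-- loop_phase1 at the loop's actual start (idx = -1, absolute index 0).
theorem loop_start (tag : String) (ls : List String) :
    parseHtmlLoop tag ls (-1) (-1) (-1) =
      match ls.findIdx? (fun l => PySem.Str.isIn ("<" ++ tag) l) with
      | none => (-1, -1)
      | some i =>
        match (ls.drop (i + 1)).findIdx? (fun l => PySem.Str.isIn ("</" ++ tag) l) with
        | none => ((i : Int), -1)
        | some j => ((i : Int), (i : Int) + (j : Int) + 2) := by
  have h := loop_phase1 tag ls 0
  simpa using h

-- B, phase 2 characterized: with accumulated block `block`, the result is the block
-- extended through the first closing line, or "" if there is none.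
theorem altScanClose_eq (c : String) (ls : List String) (block : List String) :
    altScanClose c ls block =
      match ls.findIdx? (fun l => PySem.Str.isIn c l) with
      | none => ""
      | some j => PySem.Str.join "\n" (block ++ ls.take (j + 1)) := by
  induction ls generalizing block with
  | nil => rfl
  | cons l rest ih =>
    by_cases hp : PySem.Chars.isIn c.toList l.toList = true
    · simp [altScanClose, hp, List.findIdx?_cons, List.take_succ_cons]
    · simp only [altScanClose, PySem.Str.isIn_eq, hp, Bool.false_eq_true, if_false,
        List.findIdx?_cons]
      rw [ih]
      cases hrest : rest.findIdx? (fun l => PySem.Str.isIn c l) with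
      | none =>
        simp only [PySem.Str.isIn_eq] at hrest
        simp [hrest]
      | some j =>
        simp only [PySem.Str.isIn_eq] at hrest
        simp [hrest, List.take_succ_cons, List.append_assoc]

-- B characterized: the first opening line at index i starts the block, which then runs
-- through the first closing line strictly after it.
theorem altScanOpen_eq (o c : String) (ls : List String) :
    altScanOpen o c ls =
      match ls.findIdx? (fun l => PySem.Str.isIn o l) with
      | none => ""
      | some i =>
        match (ls.drop (i + 1)).findIdx? (fun l => PySem.Str.isIn c l) with
        | none => ""
        | some j => PySem.Str.join "\n" ((ls.drop i).take (j + 2)) := by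
  induction ls with
  | nil => rfl
  | cons l rest ih =>
    by_cases hp : PySem.Chars.isIn o.toList l.toList = true
    · simp only [altScanOpen, PySem.Str.isIn_eq, hp, if_true, List.findIdx?_cons,
        List.drop_succ_cons, List.drop_zero]
      rw [altScanClose_eq]
      cases hrest : rest.findIdx? (fun l => PySem.Str.isIn c l) with
      | none =>
        simp only [PySem.Str.isIn_eq] at hrest
        simp [hrest]
      | some j =>
        simp only [PySem.Str.isIn_eq] at hrest
        simp [hrest, List.take_succ_cons]
    · simp only [altScanOpen, PySem.Str.isIn_eq, hp, Bool.false_eq_true, if_false,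
        List.findIdx?_cons]
      rw [ih]
      cases hrest : rest.findIdx? (fun l => PySem.Str.isIn o l) with
      | none =>
        simp only [PySem.Str.isIn_eq] at hrest
        simp [hrest]
      | some i =>
        simp only [PySem.Str.isIn_eq] at hrest
        simp [hrest]

-- The final `if idx1 != -1 and idx2 != -1` of A against B's second-phase outcome o.
theorem inner_case (ls : List String) (i : Nat) (o : Option Nat) :
    (if (match o with
          | none => ((i : Int), (-1 : Int))
          | some j => ((i : Int), (i : Int) + (j : Int) + 2)).1 ≠ -1 ∧
        (match o with
          | none => ((i : Int), (-1 : Int))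
          | some j => ((i : Int), (i : Int) + (j : Int) + 2)).2 ≠ -1 then
       PySem.Str.join "\n"
         (PySem.List.slice ls
           (some (match o with
             | none => ((i : Int), (-1 : Int))
             | some j => ((i : Int), (i : Int) + (j : Int) + 2)).1)
           (some (match o with
             | none => ((i : Int), (-1 : Int))
             | some j => ((i : Int), (i : Int) + (j : Int) + 2)).2))
     else "") =
    (match o with
      | none => ""
      | some j => PySem.Str.join "\n" ((ls.drop i).take (j + 2))) := by
  cases o with
  | none => simp
  | some j =>
    simp only []
    rw [if_pos (by constructor <;> omega)]
    have hc : ((i : Int)) + (j : Int) + 2 = (i : Int) + ((j + 2 : Nat) : Int) := by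
      push_cast; ring
    rw [hc, PySem.List.slice_natCast_add]

-- ===== VERDICT (by name: the statement is the Claim_ definition above) =====
theorem parseHtml_spec : Claim_equal_parseHtml := by
  intro html tag _hdom
  unfold Spec_parseHtml parseHtml parseHtml_alt
  simp only []
  rw [loop_start, altScanOpen_eq]
  cases h1 : (PySem.Str.splitlines html).findIdx? (fun line => PySem.Str.isIn ("<" ++ tag) line) with
  | none => simp
  | some i =>
    exact inner_case (PySem.Str.splitlines html) i
      (((PySem.Str.splitlines html).drop (i + 1)).findIdx?
        (fun line => PySem.Str.isIn ("</" ++ tag) line))
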